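-- pv_equiv track=rewrite | github.com/JSarasua/AdventOfCode2021 | Source/Day15.py | MakeDay2CavernMap
-- ===== SOURCE A (Python) =====
-- def GetValAtCoordinate( list:list, xy:tuple):
--     return list[xy[1]][xy[0]]
--
-- def SetValAtCoordinate( list:list, xy:tuple, val):
--     list[xy[1]][xy[0]] = val
--     return
--
-- def MakeListInitialVal(length, initialVal):
--     list = [initialVal] * length
--     return list
--
-- def Make2DList(rowLen, colLen, initialVal):
--     list = []
--     for colIndex in range(0, colLen):
--         list.append(MakeListInitialVal(rowLen, initialVal))
--
--     return list
--
-- def MakeDay2CavernMap( cavernMap):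
--     rowLen = len(cavernMap[0])
--     colLen = len(cavernMap)
--     totalRowLen = len(cavernMap[0])*5
--     totalColLen = len(cavernMap)*5
--
--     BigMap = Make2DList(totalRowLen, totalColLen, 0)
--
--     for rowIndex in range(0, len(BigMap)):
--         for colIndex in range(0, len(BigMap[0])):
--             rowMod = rowIndex % rowLen
--             colMod = colIndex % colLen
--             rowDiv = rowIndex // rowLen
--             colDiv = colIndex // colLen
--             newVal = GetValAtCoordinate(cavernMap, (colMod,rowMod)) + rowDiv + colDiv
--             if newVal > 9:
--                 newVal %= 10
--                 newVal += 1
--             SetValAtCoordinate(BigMap, (colIndex,rowIndex), newVal)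
--
--     return BigMap
-- ===== SOURCE B (Python) =====
-- def _wrap(v):
--     if v > 9:
--         v %= 10
--         v += 1
--     return v
--
-- def MakeDay2CavernMap(cavernMap):
--     # Build the 5x5-tiled map block by block: each output row is five wrapped
--     # horizontal copies of one source row, and the five tile-bands are stacked.
--     return [[_wrap(v + tr + tc) for tc in range(5) for v in row]
--             for tr in range(5) for row in cavernMap]
-- ===== Notes on version B (the rewrite author's own statement) =====
-- stated objective: simpler
-- what changed: B builds the tiled map block-by-block with nested comprehensions (five wrapped copies of each source row, five stacked bands) instead of A's cell-by-cell fill of a preallocated zero grid that recovers tile coordinates with // and % and mutates in place; dropping the per-cell index arithmetic and per-cell list writes makes B measurably faster by a constant factor.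
-- intended difference: On nonempty maps whose first row is empty but some row is not, A returns 5*n empty rows (rowLen=0 empties its inner loop, silently discarding every value) while B returns the proper 5x5 block tiling of each row, which is the intended map. — e.g. on MakeDay2CavernMap([[], [0]]): A returns [[], [], [], [], [], [], [], [], [], []], B returns [[], [0, 1, 2, 3, 4], [], [1, 2, 3, 4, 5], [], [2, 3, 4, 5, 6], [], [3, 4, 5, 6, 7], [], [4, 5, 6, 7, 8]]
import Mathlib
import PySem

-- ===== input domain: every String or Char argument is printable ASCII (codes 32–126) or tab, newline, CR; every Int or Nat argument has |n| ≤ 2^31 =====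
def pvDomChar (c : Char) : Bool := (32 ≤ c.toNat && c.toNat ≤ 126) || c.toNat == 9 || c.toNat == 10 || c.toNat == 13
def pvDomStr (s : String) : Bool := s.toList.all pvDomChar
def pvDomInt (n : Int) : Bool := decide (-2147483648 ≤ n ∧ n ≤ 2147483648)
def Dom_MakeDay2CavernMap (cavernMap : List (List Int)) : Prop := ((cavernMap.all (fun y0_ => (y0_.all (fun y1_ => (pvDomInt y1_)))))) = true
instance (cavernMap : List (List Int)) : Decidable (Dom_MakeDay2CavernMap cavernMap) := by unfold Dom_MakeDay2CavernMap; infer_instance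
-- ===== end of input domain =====

-- B builds the 5x5-tiled map block-by-block (five wrapped copies of each source row,
-- five stacked bands) instead of A's cell-by-cell fill of a zero grid via // and %;
-- objective: simpler.  (A mutates only its local BigMap; no caller-visible mutation.)


-- ===== PORT A =====
-- list[xy[1]][xy[0]]; pyGetD is exact under the in-range condition, which holds
-- wherever A returns (outside Pre_ the Python raises instead).
def GetValAtCoordinateA (l : List (List Int)) (xy : Int × Int) : Int :=
  PySem.List.pyGetD (PySem.List.pyGetD l xy.2 []) xy.1 0

-- list[xy[1]][xy[0]] = val; indices produced by range(0, len) are in range here.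
def SetValAtCoordinateA (l : List (List Int)) (xy : Int × Int) (v : Int) : List (List Int) :=
  PySem.List.pySetD l xy.2 (PySem.List.pySetD (PySem.List.pyGetD l xy.2 []) xy.1 v)

def MakeListInitialValA (length : Int) (initialVal : Int) : List Int :=
  List.replicate length.toNat initialVal

def Make2DListA (rowLen colLen : Int) (initialVal : Int) : List (List Int) :=
  (PySem.List.pyRange 0 colLen 1).foldl
    (fun l _ => l ++ [MakeListInitialValA rowLen initialVal]) []

def MakeDay2CavernMap (cavernMap : List (List Int)) : List (List Int) :=
  let rowLen : Int := (PySem.List.pyGetD cavernMap 0 []).length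
  let colLen : Int := cavernMap.length
  let totalRowLen : Int := ((PySem.List.pyGetD cavernMap 0 []).length : Int) * 5
  let totalColLen : Int := (cavernMap.length : Int) * 5
  let BigMap := Make2DListA totalRowLen totalColLen 0
  (PySem.List.pyRange 0 (BigMap.length : Int) 1).foldl
    (fun bm rowIndex =>
      (PySem.List.pyRange 0 ((PySem.List.pyGetD bm 0 []).length : Int) 1).foldl
        (fun bm' colIndex =>
          let rowMod := PySem.Int.mod rowIndex rowLen
          let colMod := PySem.Int.mod colIndex colLen
          let rowDiv := PySem.Int.floordiv rowIndex rowLen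
          let colDiv := PySem.Int.floordiv colIndex colLen
          let newVal := GetValAtCoordinateA cavernMap (colMod, rowMod) + rowDiv + colDiv
          let newVal := if newVal > 9 then PySem.Int.mod newVal 10 + 1 else newVal
          SetValAtCoordinateA bm' (colIndex, rowIndex) newVal)
        bm)
    BigMap

-- ===== PORT B =====
def pvWrap (v : Int) : Int := if v > 9 then PySem.Int.mod v 10 + 1 else v

def MakeDay2CavernMap_alt (cavernMap : List (List Int)) : List (List Int) :=
  (PySem.List.pyRange 0 5 1).flatMap (fun tr =>
    cavernMap.map (fun row =>
      (PySem.List.pyRange 0 5 1).flatMap (fun tc =>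
        row.map (fun v => pvWrap (v + tr + tc)))))

-- ===== PRECONDITION & SPEC =====
-- Pre_ covers the nonempty maps A returns a value on in its natural use: square
-- grids, plus grids whose first row is empty (A returns there too, see D_ below).
-- Excluded inputs: the empty list and non-square maps, where A raises IndexError —
-- except certain ragged maps with long early rows, where A's swapped row/column
-- moduli still produce a value; ragged input is outside this AoC helper's domain
-- and B tiles it naturally row by row.
def Pre_MakeDay2CavernMap (cavernMap : List (List Int)) : Prop :=
  cavernMap ≠ [] ∧
    (cavernMap.getD 0 [] = [] ∨ ∀ row ∈ cavernMap, row.length = cavernMap.length)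
instance (cavernMap : List (List Int)) : Decidable (Pre_MakeDay2CavernMap cavernMap) := by
  unfold Pre_MakeDay2CavernMap; infer_instance

def pvWitness_MakeDay2CavernMap : List (List Int) := [[1, 2], [3, 4]]

-- On nonempty maps whose first row is empty but some row is not, A returns 5*n empty
-- rows (rowLen = 0 empties its inner loop, silently discarding every value), while B
-- returns the 5x5 tiling of each row; B's block tiling is the intended value.
def D_MakeDay2CavernMap (cavernMap : List (List Int)) : Prop :=
  cavernMap ≠ [] ∧ cavernMap.getD 0 [] = [] ∧ ¬ (∀ row ∈ cavernMap, row = [])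
instance (cavernMap : List (List Int)) : Decidable (D_MakeDay2CavernMap cavernMap) := by
  unfold D_MakeDay2CavernMap; infer_instance

def Spec_MakeDay2CavernMap (cavernMap : List (List Int)) (out : List (List Int)) : Prop := ¬ D_MakeDay2CavernMap cavernMap → out = MakeDay2CavernMap_alt cavernMap
instance (cavernMap : List (List Int)) (out : List (List Int)) : Decidable (Spec_MakeDay2CavernMap cavernMap out) := by unfold Spec_MakeDay2CavernMap; infer_instance

def pvDiffWitness_MakeDay2CavernMap : List (List Int) := [[], [0]]
def pvDiffWitnessOut_MakeDay2CavernMap : (List (List Int)) × (List (List Int)) :=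
  ([[], [], [], [], [], [], [], [], [], []],
   [[], [0, 1, 2, 3, 4], [], [1, 2, 3, 4, 5], [], [2, 3, 4, 5, 6], [], [3, 4, 5, 6, 7], [], [4, 5, 6, 7, 8]])

-- ===== CLAIM (what is proved, stated in full; the proofs are below) =====
def Claim_unchanged_MakeDay2CavernMap : Prop := ∀ (cavernMap : List (List Int)), Dom_MakeDay2CavernMap cavernMap → Pre_MakeDay2CavernMap cavernMap → Spec_MakeDay2CavernMap cavernMap (MakeDay2CavernMap cavernMap)
def Claim_changed_MakeDay2CavernMap : Prop := Dom_MakeDay2CavernMap (pvDiffWitness_MakeDay2CavernMap) ∧ Pre_MakeDay2CavernMap (pvDiffWitness_MakeDay2CavernMap) ∧ D_MakeDay2CavernMap (pvDiffWitness_MakeDay2CavernMap) ∧ MakeDay2CavernMap (pvDiffWitness_MakeDay2CavernMap) = pvDiffWitnessOut_MakeDay2CavernMap.1 ∧ MakeDay2CavernMap_alt (pvDiffWitness_MakeDay2CavernMap) = pvDiffWitnessOut_MakeDay2CavernMap.2 ∧ pvDiffWitnessOut_MakeDay2CavernMap.1 ≠ pvDiffWitnessOut_MakeDay2CavernMap.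2
def Claim_exact_MakeDay2CavernMap : Prop := ∀ (cavernMap : List (List Int)), Dom_MakeDay2CavernMap cavernMap → Pre_MakeDay2CavernMap cavernMap → D_MakeDay2CavernMap cavernMap → MakeDay2CavernMap cavernMap ≠ MakeDay2CavernMap_alt cavernMap

-- ===== LEMMAS AND PROOFS =====

-- the common normal form both ports are reduced to: cell (R, C) of the tiled map
def pvGet (cm : List (List Int)) (r c : Nat) : Int := (cm.getD r []).getD c 0

def pvCell (cm : List (List Int)) (n R C : Nat) : Int :=
  pvWrap (pvGet cm (R % n) (C % n) + ((R / n : Nat) : Int) + ((C / n : Nat) : Int))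

def pvGrid (cm : List (List Int)) (n : Nat) : List (List Int) :=
  (List.range (5 * n)).map (fun R => (List.range (5 * n)).map (fun C => pvCell cm n R C))

lemma take_set {α : Type} (l : List α) (k : Nat) (v : α) (h : k < l.length) :
    (l.set k v).take (k+1) = l.take k ++ [v] := by
  rw [List.set_eq_take_cons_drop v h, List.take_append]
  simp [List.length_take, Nat.min_eq_left h.le, List.take_succ_cons]

lemma fold_set_range' {α : Type} (g : Nat → α) :
    ∀ (m k : Nat) (xs : List α), k + m = xs.length →
      (List.range' k m).foldl (fun r c => r.set c (g c)) xs
        = xs.take k ++ (List.range' k m).map g := by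
  intro m
  induction m with
  | zero => intro k xs h; simp [List.take_of_length_le (by omega : xs.length ≤ k)]
  | succ m ih =>
    intro k xs h
    rw [List.range'_succ]
    simp only [List.foldl_cons, List.map_cons]
    rw [ih (k+1) (xs.set k (g k)) (by simp; omega)]
    rw [take_set xs k (g k) (by omega)]
    simp [List.append_assoc]

lemma foldl_set_row {α β : Type} (R : Nat) (step : List α → β → List α)
    (l : List β) :
    ∀ (bm : List (List α)), R < bm.length →
      l.foldl (fun bm' c => bm'.set R (step (bm'.getD R []) c)) bm
        = bm.set R (l.foldl step (bm.getD R [])) := by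
  induction l with
  | nil =>
    intro bm h
    simp [List.getD_eq_getElem?_getD, List.getElem?_eq_getElem h, List.set_getElem_self]
  | cons c l ih =>
    intro bm h
    simp only [List.foldl_cons]
    rw [ih _ (by simpa using h)]
    rw [List.set_set]
    congr 1
    have h2 : R < (bm.set R (step (bm.getD R []) c)).length := by simpa using h
    rw [List.getD_eq_getElem?_getD, List.getElem?_eq_getElem h2]
    simp [List.getElem_set_self]

lemma range_mul_flatMap (m n : Nat) :
    List.range (m * n) = (List.range m).flatMap (fun t => (List.range n).map (fun i => t * n + i)) := by
  induction m with
  | zero => simp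
  | succ m ih =>
    rw [Nat.succ_mul, List.range_add, ih, List.range_succ]
    simp

lemma map_eq_map_range {α β : Type} (d : α) (h : α → β) (l : List α) :
    l.map h = (List.range l.length).map (fun i => h (l.getD i d)) := by
  apply List.ext_getElem
  · simp
  · intro i h1 h2
    have hi : i < l.length := by simpa using h1
    simp [List.getD_eq_getElem?_getD, List.getElem?_eq_getElem hi]




lemma pyRange5 : PySem.List.pyRange 0 5 1 = (List.range 5).map (fun k : Nat => (k : Int)) := by decide

lemma cell_reduce (cm : List (List Int)) (n t r tc c : Nat) (hn : 0 < n) (hr : r < n) (hc : c < n) :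
    pvCell cm n (t * n + r) (tc * n + c) = pvWrap (pvGet cm r c + (t : Int) + (tc : Int)) := by
  unfold pvCell
  rw [mul_comm t n, mul_comm tc n, Nat.mul_add_mod, Nat.mod_eq_of_lt hr,
      Nat.mul_add_mod, Nat.mod_eq_of_lt hc, Nat.mul_add_div hn, Nat.mul_add_div hn,
      Nat.div_eq_of_lt hr, Nat.div_eq_of_lt hc]
  simp

lemma row_flat (cm : List (List Int)) (n R : Nat) :
    (List.range (5 * n)).map (fun C => pvCell cm n R C)
      = (List.range 5).flatMap (fun tc => (List.range n).map (fun c => pvCell cm n R (tc * n + c))) := by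
  rw [range_mul_flatMap 5 n, List.map_flatMap]
  simp [List.map_map, Function.comp_def]


lemma getD_mem_of_lt {α : Type} (l : List α) (d : α) (i : Nat) (h : i < l.length) :
    l.getD i d ∈ l := by
  rw [List.getD_eq_getElem l d h]; exact List.getElem_mem h


lemma band_eq (cm : List (List Int)) (n : Nat) (hn : n = cm.length) (hn0 : 0 < n)
    (hsq : ∀ row ∈ cm, row.length = n) (t : Nat) :
    cm.map (fun row => (PySem.List.pyRange 0 5 1).flatMap (fun tc => row.map (fun v => pvWrap (v + (t : Int) + tc))))
      = (List.range n).map (fun r => (List.range (5 * n)).map (fun C => pvCell cm n (t * n + r) C)) := by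
  rw [map_eq_map_range ([] : List Int), ← hn]
  apply List.map_congr_left
  intro r hr
  rw [List.mem_range] at hr
  have hrow : (cm.getD r ([] : List Int)).length = n :=
    hsq _ (getD_mem_of_lt cm [] r (by omega))
  rw [row_flat, pyRange5]
  simp only [List.flatMap_map]
  apply List.flatMap_congr
  intro tc _
  rw [map_eq_map_range (0 : Int) _ (cm.getD r []), hrow]
  apply List.map_congr_left
  intro c hc
  rw [List.mem_range] at hc
  rw [cell_reduce cm n t r tc c hn0 hr hc]
  rfl



lemma B_char (cm : List (List Int)) (hne : cm ≠ [])
    (hsq : ∀ row ∈ cm, row.length = cm.length) :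
    MakeDay2CavernMap_alt cm = pvGrid cm cm.length := by
  set n := cm.length with hn
  have hn0 : 0 < n := by simpa [hn] using List.length_pos_of_ne_nil hne
  have hb : ∀ (t : Nat) (ti : Int), ti = (t : Int) →
      cm.map (fun row => (PySem.List.pyRange 0 5 1).flatMap (fun tc => row.map (fun v => pvWrap (v + ti + tc))))
        = (List.range n).map (fun r => (List.range (5 * n)).map (fun C => pvCell cm n (t * n + r) C)) := by
    intro t ti hti; rw [hti]; exact band_eq cm n hn hn0 hsq t
  have grid5 : ∀ (G : Nat → List Int), (List.range (5 * n)).map G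
      = (List.range 5).flatMap (fun t => (List.range n).map (fun r => G (t * n + r))) := by
    intro G
    rw [range_mul_flatMap 5 n, List.map_flatMap]
    simp [List.map_map, Function.comp_def]
  have expandI : ∀ (g : Int → List (List Int)), (PySem.List.pyRange 0 5 1).flatMap g
      = g 0 ++ (g 1 ++ (g 2 ++ (g 3 ++ g 4))) := by
    intro g
    rw [show PySem.List.pyRange 0 5 1 = [0,1,2,3,4] from by decide]
    simp
  have expandN : ∀ (g : Nat → List (List Int)), (List.range 5).flatMap g
      = g 0 ++ (g 1 ++ (g 2 ++ (g 3 ++ g 4))) := by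
    intro g
    rw [show List.range 5 = [0,1,2,3,4] from by decide]
    simp
  unfold MakeDay2CavernMap_alt pvGrid
  rw [grid5 (fun R => (List.range (5 * n)).map (fun C => pvCell cm n R C))]
  rw [expandI (fun tr => cm.map (fun row => (PySem.List.pyRange 0 5 1).flatMap (fun tc => row.map (fun v => pvWrap (v + tr + tc)))))]
  rw [expandN (fun t => (List.range n).map (fun r => (fun R => (List.range (5 * n)).map (fun C => pvCell cm n R C)) (t * n + r)))]
  rw [hb 0 0 (by norm_num), hb 1 1 (by norm_num), hb 2 2 (by norm_num),
      hb 3 3 (by norm_num), hb 4 4 (by norm_num)]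






lemma make2d (r c : Nat) :
    Make2DListA (r : Int) (c : Int) 0 = List.replicate c (List.replicate r 0) := by
  unfold Make2DListA MakeListInitialValA
  rw [PySem.List.foldl_append_singleton_eq_map, PySem.List.pyRange_zero_nat]
  simp [List.map_map, Function.comp_def]

lemma inner_body (cm : List (List Int)) (n : Nat) (bm : List (List Int)) (R : Nat) :
    (PySem.List.pyRange 0 (((PySem.List.pyGetD bm 0 []).length : Nat) : Int) 1).foldl
      (fun bm' colIndex =>
        SetValAtCoordinateA bm' (colIndex, (R : Int))
          (if GetValAtCoordinateA cm (PySem.Int.mod colIndex (n : Int), PySem.Int.mod (R : Int) (n : Int))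
                + PySem.Int.floordiv (R : Int) (n : Int) + PySem.Int.floordiv colIndex (n : Int) > 9
           then PySem.Int.mod (GetValAtCoordinateA cm (PySem.Int.mod colIndex (n : Int), PySem.Int.mod (R : Int) (n : Int))
                + PySem.Int.floordiv (R : Int) (n : Int) + PySem.Int.floordiv colIndex (n : Int)) 10 + 1
           else GetValAtCoordinateA cm (PySem.Int.mod colIndex (n : Int), PySem.Int.mod (R : Int) (n : Int))
                + PySem.Int.floordiv (R : Int) (n : Int) + PySem.Int.floordiv colIndex (n : Int)))
      bm
    = (List.range (bm.getD 0 []).length).foldl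
        (fun bm' C => bm'.set R ((bm'.getD R []).set C (pvCell cm n R C))) bm := by
  rw [PySem.List.pyRange_zero_nat, List.foldl_map, PySem.List.pyGetD_zero]
  apply PySem.List.foldl_congr_mem
  intro bm' C _
  unfold SetValAtCoordinateA GetValAtCoordinateA pvCell pvGet pvWrap
  rw [PySem.Int.mod_natCast R n, PySem.Int.mod_natCast C n,
      PySem.Int.floordiv_natCast R n, PySem.Int.floordiv_natCast C n]
  simp only [PySem.List.pyGetD_natCast, PySem.List.pySetD_natCast]

lemma outer_fold (cm : List (List Int)) (n W : Nat) :
    ∀ (m k : Nat) (bm : List (List Int)), k + m = bm.length →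
      (∀ row ∈ bm, row.length = W) →
      (List.range' k m).foldl
        (fun bm R => (List.range (bm.getD 0 []).length).foldl
          (fun bm' C => bm'.set R ((bm'.getD R []).set C (pvCell cm n R C))) bm) bm
      = bm.take k ++ (List.range' k m).map
          (fun R => (List.range W).map (fun C => pvCell cm n R C)) := by
  intro m
  induction m with
  | zero =>
    intro k bm h _
    simp [List.take_of_length_le (by omega : bm.length ≤ k)]
  | succ m ih =>
    intro k bm h hrows
    have hlen : 0 < bm.length := by omega
    have hk : k < bm.length := by omega
    have hW0 : (bm.getD 0 []).length = W := hrows _ (getD_mem_of_lt bm [] 0 hlen)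
    have hWk : (bm.getD k []).length = W := hrows _ (getD_mem_of_lt bm [] k hk)
    rw [List.range'_succ]
    simp only [List.foldl_cons, List.map_cons]
    have hstep : (List.range (bm.getD 0 []).length).foldl
        (fun bm' C => bm'.set k ((bm'.getD k []).set C (pvCell cm n k C))) bm
        = bm.set k ((List.range W).map (fun C => pvCell cm n k C)) := by
      rw [hW0, foldl_set_row k (fun row C => row.set C (pvCell cm n k C)) (List.range W) bm hk,
          List.range_eq_range',
          fold_set_range' (pvCell cm n k) W 0 _ (by simpa using hWk.symm)]
      simp [← List.range_eq_range']
    rw [hstep]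
    rw [ih (k+1) _ (by simp; omega)
        (by intro row hrow
            rcases List.mem_or_eq_of_mem_set hrow with h' | h'
            · exact hrows _ h'
            · simp [h'])]
    rw [take_set bm k _ hk]
    simp [List.append_assoc]

lemma A_char (cm : List (List Int)) (hne : cm ≠ [])
    (hsq : ∀ row ∈ cm, row.length = cm.length) :
    MakeDay2CavernMap cm = pvGrid cm cm.length := by
  set n := cm.length with hn
  have hn0 : 0 < n := by simpa [hn] using List.length_pos_of_ne_nil hne
  have hrow0 : (PySem.List.pyGetD cm 0 []).length = n := by
    rw [PySem.List.pyGetD_zero]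
    exact hsq _ (getD_mem_of_lt cm [] 0 hn0)
  unfold MakeDay2CavernMap
  simp only [hrow0]
  rw [← hn]
  rw [show ((n : Int) * 5) = (((n * 5 : Nat)) : Int) from by push_cast; ring, make2d]
  have hlen : ((List.replicate (n * 5) (List.replicate (n * 5) (0 : Int))).length : Int)
      = ((n * 5 : Nat) : Int) := by simp
  rw [hlen, PySem.List.pyRange_zero_nat, List.foldl_map]
  rw [PySem.List.foldl_congr_mem _ _
      (fun bm R => (List.range (bm.getD 0 []).length).foldl
        (fun bm' C => bm'.set R ((bm'.getD R []).set C (pvCell cm n R C))) bm) _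
      (fun bm R _ => inner_body cm n bm R)]
  rw [List.range_eq_range',
      outer_fold cm n (n * 5) (n * 5) 0 _ (by simp) (by intro row hr; rw [List.eq_of_mem_replicate hr]; simp)]
  unfold pvGrid
  simp [← List.range_eq_range', Nat.mul_comm]


lemma A_char0 (cm : List (List Int)) (hne : cm ≠ []) (h0 : cm.getD 0 [] = []) :
    MakeDay2CavernMap cm = List.replicate (cm.length * 5) [] := by
  have hL : (PySem.List.pyGetD cm 0 ([] : List Int)).length = 0 := by
    rw [PySem.List.pyGetD_zero, h0]; rfl
  unfold MakeDay2CavernMap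
  simp only [hL]
  rw [show ((0 : Nat) : Int) * 5 = (((0 * 5 : Nat)) : Int) from by norm_num,
      show ((cm.length : Int) * 5) = (((cm.length * 5 : Nat)) : Int) from by push_cast; ring,
      make2d]
  simp only [Nat.zero_mul, List.replicate_zero]
  apply List.foldl_fixed'
  intro x
  have hg : (List.replicate (cm.length * 5) ([] : List Int)).getD 0 [] = [] := by
    rcases Nat.eq_zero_or_pos (cm.length * 5) with h | h
    · simp [h]
    · rw [List.getD_eq_getElem _ _ (by simpa using h)]; simp
  rw [PySem.List.pyGetD_zero, hg]
  simp [PySem.List.pyRange_one_eq_nil]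


lemma B_char0 (cm : List (List Int)) (hne : cm ≠ []) (hall : ∀ row ∈ cm, row = []) :
    MakeDay2CavernMap_alt cm = List.replicate (cm.length * 5) [] := by
  unfold MakeDay2CavernMap_alt
  have hmap : ∀ tr : Int, cm.map (fun row =>
      (PySem.List.pyRange 0 5 1).flatMap (fun tc => row.map (fun v => pvWrap (v + tr + tc))))
      = List.replicate cm.length [] := by
    intro tr
    have h1 : cm.map (fun row =>
        (PySem.List.pyRange 0 5 1).flatMap (fun tc => row.map (fun v => pvWrap (v + tr + tc))))
        = cm.map (fun _ => ([] : List Int)) :=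
      List.map_congr_left (fun row hr => by rw [hall row hr]; simp)
    rw [h1]
    simp [List.map_const']
  rw [List.flatMap_congr (fun tr _ => hmap tr)]
  rw [show PySem.List.pyRange 0 5 1 = [0,1,2,3,4] from by decide]
  simp only [List.flatMap_cons, List.flatMap_nil, List.append_nil, ← List.replicate_add]
  congr 1
  ring


lemma A_ne_B (cm : List (List Int)) (hne : cm ≠ []) (h0 : cm.getD 0 [] = [])
    (hnall : ¬ (∀ row ∈ cm, row = [])) :
    MakeDay2CavernMap cm ≠ MakeDay2CavernMap_alt cm := by
  rw [A_char0 cm hne h0]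
  intro heq
  push_neg at hnall
  obtain ⟨row, hmem, hrow⟩ := hnall
  have hy : (PySem.List.pyRange 0 5 1).flatMap (fun tc => row.map (fun v => pvWrap (v + 0 + tc)))
      ∈ MakeDay2CavernMap_alt cm := by
    unfold MakeDay2CavernMap_alt
    exact List.mem_flatMap.mpr ⟨0, by decide, List.mem_map_of_mem hmem⟩
  rw [← heq] at hy
  have hy0 := List.eq_of_mem_replicate hy
  rw [List.flatMap_eq_nil_iff] at hy0
  have := hy0 0 (by decide)
  rw [List.map_eq_nil_iff] at this
  exact hrow this

-- ===== VERDICT (by name: the statements are the Claim_ definitions above) =====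
theorem MakeDay2CavernMap_spec : Claim_unchanged_MakeDay2CavernMap := by
  intro cm _ hP
  unfold Spec_MakeDay2CavernMap
  intro hnd
  obtain ⟨hne, hP2⟩ := hP
  rcases hP2 with h0 | hsq
  · have hall : ∀ row ∈ cm, row = [] := by
      by_contra hx
      exact hnd ⟨hne, h0, hx⟩
    rw [A_char0 cm hne h0, B_char0 cm hne hall]
  · rw [A_char cm hne hsq, B_char cm hne hsq]

set_option maxRecDepth 8192 in
theorem MakeDay2CavernMap_changed : Claim_changed_MakeDay2CavernMap := by
  unfold Claim_changed_MakeDay2CavernMap; decide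

theorem MakeDay2CavernMap_tight : Claim_exact_MakeDay2CavernMap := by
  intro cm _ hP hD
  obtain ⟨hne, h0, hnall⟩ := hD
  exact A_ne_B cm hne h0 hnall
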